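-- pv_equiv track=rewrite | github.com/Son-Hunseo/Algo_Exercise | 기업 코테와 비슷한 유형 문제들/BJ4659(V).py | check
-- ===== SOURCE A (Python) =====
-- mo = ["a", "e", "i", "o", "u"]
--
-- def check(password):
--     mo_check = False
--     for con in password:
--         if con in mo:
--             mo_check = True
--             break
--
--     three_check = True
--     mo_cnt = 0
--     ja_cnt = 0
--     for con in password:
--         if con in mo:
--             ja_cnt = 0
--             mo_cnt += 1
--         else:
--             mo_cnt = 0
--             ja_cnt += 1
--         if (mo_cnt == 3) or (ja_cnt == 3):
--             three_check = False
--             break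
--
--     same_check = True
--     before = "abc"
--     for con in password:
--         # con != ("e" or "o") 이렇게 작성하면 내가 생각하는 것처럼 작동하지 않는다.
--         #
--         if (con != "e") and (con != "o") and (before == con):
--             same_check = False
--             break
--         before = con
--
--     if (same_check == True) and (mo_check == True) and (three_check == True):
--         return True
--     else:
--         return False
-- ===== SOURCE B (Python) =====
-- VOWELS = frozenset("aeiou")
--
-- def check(password):
--     # Single fused pass: sticky flags, no breaks.
--     has_vowel = False
--     three_bad = False
--     same_bad = False
--     run_v = 0
--     run_c = 0
--     before = ""
--     for con in password:
--         if con in VOWELS: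
--             has_vowel = True
--             run_v += 1
--             run_c = 0
--         else:
--             run_v = 0
--             run_c += 1
--         if run_v == 3 or run_c == 3:
--             three_bad = True
--         if con == before and con != "e" and con != "o":
--             same_bad = True
--         before = con
--     return has_vowel and not three_bad and not same_bad
-- ===== Notes on version B (the rewrite author's own statement) =====
-- stated objective: simpler
-- what changed: Replaces A's three separate break-early scans of the password with one fused single pass maintaining sticky flags (has_vowel, three_bad, same_bad) and run counters, returning a boolean expression over the flags.
import Mathlib
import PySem

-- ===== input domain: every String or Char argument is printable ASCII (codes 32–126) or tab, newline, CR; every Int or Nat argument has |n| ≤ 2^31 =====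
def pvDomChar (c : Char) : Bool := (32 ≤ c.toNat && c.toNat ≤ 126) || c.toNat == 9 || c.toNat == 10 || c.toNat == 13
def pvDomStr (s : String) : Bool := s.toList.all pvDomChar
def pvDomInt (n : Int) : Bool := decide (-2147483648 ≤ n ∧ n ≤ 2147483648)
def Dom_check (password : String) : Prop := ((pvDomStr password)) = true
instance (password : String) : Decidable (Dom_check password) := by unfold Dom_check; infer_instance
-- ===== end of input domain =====

-- B fuses A's three break-early scans into one pass with sticky flags (objective: simpler).

-- ===== PORT A =====
-- mo = ["a","e","i","o","u"]; `con in mo` on a single char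
def pvVowel (c : Char) : Bool := c ∈ ['a', 'e', 'i', 'o', 'u']

-- first loop: mo_check, with break at the first vowel
def pvHasA : List Char → Bool
  | [] => false
  | c :: r => if pvVowel c then true else pvHasA r

-- second loop: three_check (counters mo_cnt, ja_cnt; break when either hits 3)
def pvThreeA (moCnt jaCnt : Int) : List Char → Bool
  | [] => true
  | c :: r =>
      let moCnt' : Int := if pvVowel c then moCnt + 1 else 0
      let jaCnt' : Int := if pvVowel c then 0 else jaCnt + 1
      if moCnt' = 3 ∨ jaCnt' = 3 then false else pvThreeA moCnt' jaCnt' r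

-- third loop: same_check; A's sentinel before = "abc" equals no single-char `con`,
-- modeled exactly by `none` (Option Char)
def pvSameA (before : Option Char) : List Char → Bool
  | [] => true
  | c :: r =>
      if c ≠ 'e' ∧ c ≠ 'o' ∧ before = some c then false else pvSameA (some c) r

def check (password : String) : Bool :=
  let moCheck := pvHasA password.toList
  let threeCheck := pvThreeA 0 0 password.toList
  let sameCheck := pvSameA none password.toList
  if sameCheck = true ∧ moCheck = true ∧ threeCheck = true then true else false

-- ===== PORT B =====
structure PvSt where
  hasVowel : Bool
  runV : Int
  runC : Int
  threeBad : Bool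
  before : Option Char   -- Source B's `before = ""` sentinel, equal to no char
  sameBad : Bool

def pvStep (st : PvSt) (c : Char) : PvSt :=
  let st1 :=
    if pvVowel c then { st with hasVowel := true, runV := st.runV + 1, runC := 0 }
    else { st with runV := 0, runC := st.runC + 1 }
  let st2 := if st1.runV = 3 ∨ st1.runC = 3 then { st1 with threeBad := true } else st1
  let st3 := if st2.before = some c ∧ c ≠ 'e' ∧ c ≠ 'o' then { st2 with sameBad := true } else st2
  { st3 with before := some c }

def check_alt (password : String) : Bool :=
  let fin := password.toList.foldl pvStep ⟨false, 0, 0, false, none, false⟩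
  fin.hasVowel && !fin.threeBad && !fin.sameBad

-- ===== PRECONDITION & SPEC =====
def Spec_check (password : String) (out : Bool) : Prop := out = check_alt password
instance (password : String) (out : Bool) : Decidable (Spec_check password out) := by unfold Spec_check; infer_instance

-- ===== CLAIM (what is proved, stated in full; the proofs are below) =====
def Claim_equal_check : Prop := ∀ (password : String), Dom_check password → Spec_check password (check password)

-- ===== LEMMAS AND PROOFS =====

theorem pvStep_before (st : PvSt) (c : Char) : (pvStep st c).before = some c := by
  unfold pvStep; cases hv : pvVowel c <;> simp only [hv, Bool.false_eq_true, if_false, if_true, reduceIte] <;> split_ifs <;> rfl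

theorem pvStep_hasVowel (st : PvSt) (c : Char) :
    (pvStep st c).hasVowel = (st.hasVowel || pvVowel c) := by
  unfold pvStep; cases hv : pvVowel c <;> simp only [hv, Bool.false_eq_true, if_false, if_true, reduceIte] <;> split_ifs <;> simp_all

theorem pvStep_sameBad (st : PvSt) (c : Char) :
    (pvStep st c).sameBad
      = (st.sameBad || decide (st.before = some c ∧ c ≠ 'e' ∧ c ≠ 'o')) := by
  unfold pvStep; cases hv : pvVowel c <;> simp only [hv, Bool.false_eq_true, if_false, if_true, reduceIte] <;> split_ifs <;> simp_all

theorem pvStep_runV (st : PvSt) (c : Char) :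
    (pvStep st c).runV = (if pvVowel c then st.runV + 1 else 0) := by
  unfold pvStep; cases hv : pvVowel c <;> simp only [hv, Bool.false_eq_true, if_false, if_true, reduceIte] <;> split_ifs <;> simp_all

theorem pvStep_runC (st : PvSt) (c : Char) :
    (pvStep st c).runC = (if pvVowel c then 0 else st.runC + 1) := by
  unfold pvStep; cases hv : pvVowel c <;> simp only [hv, Bool.false_eq_true, if_false, if_true, reduceIte] <;> split_ifs <;> simp_all

theorem pvStep_threeBad (st : PvSt) (c : Char) :
    (pvStep st c).threeBad
      = (st.threeBad ||
          decide ((if pvVowel c then st.runV + 1 else 0) = 3 ∨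
                  (if pvVowel c then 0 else st.runC + 1) = 3)) := by
  unfold pvStep; cases hv : pvVowel c <;> simp only [hv, Bool.false_eq_true, if_false, if_true, reduceIte] <;> split_ifs <;> simp_all

theorem pvFold_hasVowel (l : List Char) (st : PvSt) :
    (l.foldl pvStep st).hasVowel = (st.hasVowel || pvHasA l) := by
  induction l generalizing st with
  | nil => simp [pvHasA]
  | cons c r ih =>
      simp only [List.foldl, pvHasA]
      rw [ih, pvStep_hasVowel]
      cases h : pvVowel c <;> simp [h]

theorem pvFold_sameBad (l : List Char) (st : PvSt) :
    (l.foldl pvStep st).sameBad = (st.sameBad || !pvSameA st.before l) := by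
  induction l generalizing st with
  | nil => simp [pvSameA]
  | cons c r ih =>
      simp only [List.foldl, pvSameA]
      rw [ih, pvStep_sameBad, pvStep_before]
      by_cases hb : st.before = some c ∧ c ≠ 'e' ∧ c ≠ 'o'
      · have h' : c ≠ 'e' ∧ c ≠ 'o' ∧ st.before = some c := ⟨hb.2.1, hb.2.2, hb.1⟩
        simp [hb, h']
      · have h' : ¬ (c ≠ 'e' ∧ c ≠ 'o' ∧ st.before = some c) := by tauto
        simp [hb, h']

theorem pvFold_threeBad_true (l : List Char) (st : PvSt) (h : st.threeBad = true) :
    (l.foldl pvStep st).threeBad = true := by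
  induction l generalizing st with
  | nil => exact h
  | cons c r ih =>
      simp only [List.foldl]
      exact ih _ (by rw [pvStep_threeBad, h]; rfl)

theorem pvFold_threeBad_false (l : List Char) (st : PvSt) (h : st.threeBad = false) :
    (l.foldl pvStep st).threeBad = !pvThreeA st.runV st.runC l := by
  induction l generalizing st with
  | nil => simp [pvThreeA, h]
  | cons c r ih =>
      simp only [List.foldl, pvThreeA]
      by_cases h3 : (if pvVowel c then st.runV + 1 else (0:Int)) = 3 ∨
                    (if pvVowel c then (0:Int) else st.runC + 1) = 3
      · rw [pvFold_threeBad_true r _ (by rw [pvStep_threeBad, h]; simp [h3])]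
        cases hv : pvVowel c <;> simp [hv] at h3 ⊢ <;> simp [h3]
      · rw [ih _ (by rw [pvStep_threeBad, h]; simp [h3]), pvStep_runV, pvStep_runC]
        cases hv : pvVowel c <;> simp [hv] at h3 ⊢ <;> simp [h3, not_or] at * <;> simp [h3]

-- ===== VERDICT (by name: the statement is the Claim_ definition above) =====
theorem check_spec : Claim_equal_check := by
  intro password _
  unfold Spec_check check check_alt
  show (if pvSameA none password.toList = true ∧ pvHasA password.toList = true ∧
          pvThreeA 0 0 password.toList = true then true else false)
      = ((password.toList.foldl pvStep ⟨false, 0, 0, false, none, false⟩).hasVowel &&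
         !(password.toList.foldl pvStep ⟨false, 0, 0, false, none, false⟩).threeBad &&
         !(password.toList.foldl pvStep ⟨false, 0, 0, false, none, false⟩).sameBad)
  rw [pvFold_hasVowel, pvFold_sameBad, pvFold_threeBad_false _ _ rfl]
  cases h1 : pvHasA password.toList <;>
    cases h2 : pvThreeA 0 0 password.toList <;>
      cases h3 : pvSameA none password.toList <;> simp [h1, h2, h3]
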